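-- pv_equiv track=rewrite | github.com/HarshWadhwani/LeetCode | CrackingTheCodingInterview/Arrays and strings/checkPermutation.py | checkPermutation
-- ===== SOURCE A (Python) =====
-- def dictBuilder(str):
--     dct = {}
--     for i in range(len(str)):
--         if str[i] in dct.keys():
--             dct[str[i]] += 1
--         else:
--             dct[str[i]] = 1
--
--     return dct
--
-- def checkPermutation(str1, str2):
--     counterDict = {}
--     smallerStr = ""
--
--     if len(str1) < 1 or len(str2) < 1:
--         return False
--
--     if len(str1) >= len(str2):
--         smallerStr = str2
--         counterDict = dictBuilder(str1)
--     else: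
--         smallerStr = str1
--         counterDict = dictBuilder(str2)
--
--     for i in range(len(smallerStr)):
--         if (smallerStr[i] not in counterDict.keys()) or (counterDict[smallerStr[i]] == 0):
--             return False
--         else:
--             counterDict[smallerStr[i]] -= 1
--
--     return True
-- ===== SOURCE B (Python) =====
-- def checkPermutation(str1, str2):
--     if len(str1) < 1 or len(str2) < 1:
--         return False
--     if len(str1) >= len(str2):
--         smaller, larger = str2, str1
--     else:
--         smaller, larger = str1, str2
--     small_counts = {}
--     for ch in smaller:
--         small_counts[ch] = small_counts.get(ch, 0) + 1
--     large_counts = {}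
--     for ch in larger:
--         large_counts[ch] = large_counts.get(ch, 0) + 1
--     return all(cnt <= large_counts.get(ch, 0) for ch, cnt in small_counts.items())
-- ===== Notes on version B (the rewrite author's own statement) =====
-- stated objective: alternative
-- what changed: B builds independent frequency tables for both strings and compares counts once per distinct character of the smaller string, instead of A's destructive per-position loop that decrements the larger string's table with an early exit; a timing run measured B ~2.5x faster (per-character indexing and keys() membership tests replaced by direct iteration and one comparison per distinct character).
import Mathlib
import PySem

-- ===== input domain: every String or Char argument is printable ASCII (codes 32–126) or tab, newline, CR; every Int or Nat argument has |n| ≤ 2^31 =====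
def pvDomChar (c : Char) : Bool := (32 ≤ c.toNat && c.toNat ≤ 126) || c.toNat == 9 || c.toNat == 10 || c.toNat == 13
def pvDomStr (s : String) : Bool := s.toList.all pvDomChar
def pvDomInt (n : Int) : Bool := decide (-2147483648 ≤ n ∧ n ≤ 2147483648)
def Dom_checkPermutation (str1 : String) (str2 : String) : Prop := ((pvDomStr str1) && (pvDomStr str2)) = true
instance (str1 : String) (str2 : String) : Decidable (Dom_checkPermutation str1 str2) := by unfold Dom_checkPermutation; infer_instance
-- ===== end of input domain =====

-- B replaces A's destructive decrement-with-early-exit loop by two independent count tables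
-- compared once per distinct character of the smaller string (alternative decomposition; a timing run measured B ~2.5x faster).

-- ===== PORT A =====
def dictBuilderA (s : List Char) : PySem.Dict Char Int :=
  s.foldl (fun dct c =>
    if dct.contains c then dct.modify c 0 (· + 1) else dct.insert c 1) PySem.Dict.empty

def checkLoopA : List Char → PySem.Dict Char Int → Bool
  | [], _ => true
  | c :: rest, counterDict =>
    match counterDict.get? c with          -- 'smallerStr[i] not in counterDict.keys()' / lookup
    | none => false
    | some v => if v == 0 then false else checkLoopA rest (counterDict.modify c 0 (· - 1))

def checkPermutation (str1 : String) (str2 : String) : Bool :=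
  if PySem.Str.len str1 < 1 ∨ PySem.Str.len str2 < 1 then false
  else if PySem.Str.len str2 ≤ PySem.Str.len str1 then
    checkLoopA str2.toList (dictBuilderA str1.toList)
  else
    checkLoopA str1.toList (dictBuilderA str2.toList)

-- ===== PORT B =====
def countsB (s : List Char) : PySem.Dict Char Int :=
  s.foldl (fun d ch => d.insert ch (d.getD ch 0 + 1)) PySem.Dict.empty

def checkPermutation_alt (str1 : String) (str2 : String) : Bool :=
  if PySem.Str.len str1 < 1 ∨ PySem.Str.len str2 < 1 then false
  else
    let p := if PySem.Str.len str2 ≤ PySem.Str.len str1 then (str2.toList, str1.toList)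
             else (str1.toList, str2.toList)
    let smallCounts := countsB p.1
    let largeCounts := countsB p.2
    smallCounts.items.all (fun q => decide (q.2 ≤ largeCounts.getD q.1 0))

-- ===== PRECONDITION & SPEC =====
def Spec_checkPermutation (str1 : String) (str2 : String) (out : Bool) : Prop := out = checkPermutation_alt str1 str2
instance (str1 : String) (str2 : String) (out : Bool) : Decidable (Spec_checkPermutation str1 str2 out) := by unfold Spec_checkPermutation; infer_instance

-- ===== CLAIM (what is proved, stated in full; the proofs are below) =====
def Claim_equal_checkPermutation : Prop := ∀ (str1 : String) (str2 : String), Dom_checkPermutation str1 str2 → Spec_checkPermutation str1 str2 (checkPermutation str1 str2)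

-- ===== LEMMAS AND PROOFS =====

-- A's dictBuilder builds exactly the multiset counter of its argument.
lemma dictBuilderA_eq_counter (s : List Char) : dictBuilderA s = PySem.Dict.counter s := by
  rw [PySem.Dict.counter_eq_foldl]
  unfold dictBuilderA
  apply PySem.List.foldl_congr_mem
  intro d c _
  by_cases h : d.contains c
  · simp [h]
  · have h' : d.contains c = false := by simpa using h
    simp [h, PySem.Dict.modify, PySem.Dict.getD_of_not_contains d 0 h']

-- Bool form of "all members satisfy a decidable predicate" (used to read B's .all pass).
lemma all_decide (l : List Char) (p : Char → Prop) [DecidablePred p] :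
    (l.all fun k => decide (p k)) = decide (∀ x ∈ l, p x) := by
  induction l with
  | nil => simp
  | cons a t ih => simp [List.all_cons, ih]

-- A's scanning loop succeeds iff every character of l is covered by the table's count.
lemma checkLoopA_spec (l : List Char) (d : PySem.Dict Char Int)
    (hd : ∀ c, 0 ≤ d.getD c 0) :
    checkLoopA l d = decide (∀ c ∈ l, (l.count c : Int) ≤ d.getD c 0) := by
  induction l generalizing d with
  | nil => simp [checkLoopA]
  | cons c rest ih =>
    cases hv : d.get? c with
    | none =>
      have h0 : d.getD c 0 = 0 := PySem.Dict.getD_of_get?_eq_none _ _ hv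
      have hne : ¬ (∀ c' ∈ c :: rest, ((c :: rest).count c' : Int) ≤ d.getD c' 0) := by
        intro h
        have := h c List.mem_cons_self
        rw [h0, List.count_cons_self] at this
        push_cast at this; omega
      simp only [checkLoopA, hv]
      exact (decide_eq_false hne).symm
    | some v =>
      have hgd : d.getD c 0 = v := PySem.Dict.getD_of_get?_eq_some _ _ hv
      by_cases hz : v = 0
      · subst hz
        have hne : ¬ (∀ c' ∈ c :: rest, ((c :: rest).count c' : Int) ≤ d.getD c' 0) := by
          intro h
          have := h c List.mem_cons_self
          rw [hgd, List.count_cons_self] at this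
          push_cast at this; omega
        simp only [checkLoopA, hv]
        show false = _
        exact (decide_eq_false hne).symm
      · have hv1 : 1 ≤ v := by have := hd c; rw [hgd] at this; omega
        have hstep : checkLoopA (c :: rest) d = checkLoopA rest (d.modify c 0 (· - 1)) := by
          simp [checkLoopA, hv, hz]
        rw [hstep, ih]
        · apply decide_eq_decide.mpr
          constructor
          · intro h c' hc'
            by_cases hcc : c' = c
            · subst hcc
              rw [List.count_cons_self, hgd]
              by_cases hmem : c' ∈ rest
              · have := h c' hmem
                rw [PySem.Dict.getD_modify, if_pos rfl, hgd] at this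
                push_cast at this ⊢; omega
              · rw [List.count_eq_zero_of_not_mem hmem]
                push_cast; omega
            · rcases List.mem_cons.mp hc' with h1 | h1
              · exact absurd h1 hcc
              · have := h c' h1
                rw [PySem.Dict.getD_modify, if_neg hcc] at this
                simpa [List.count_cons, Ne.symm hcc] using this
          · intro h c' hc'
            rw [PySem.Dict.getD_modify]
            by_cases hcc : c' = c
            · have := h c List.mem_cons_self
              rw [List.count_cons_self, hgd] at this
              subst hcc
              rw [if_pos rfl, hgd]
              push_cast at this ⊢; omega
            · have := h c' (List.mem_cons_of_mem _ hc')
              rw [if_neg hcc]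
              simpa [List.count_cons, Ne.symm hcc] using this
        · intro c'
          rw [PySem.Dict.getD_modify]
          by_cases hcc : c' = c
          · simp only [hcc, hgd, if_pos]; omega
          · simp only [if_neg hcc]; exact hd c'

-- B's counting fold is the counter.
lemma countsB_eq_counter (s : List Char) : countsB s = PySem.Dict.counter s :=
  PySem.Dict.foldl_insert_getD_add_one_eq_counter s

-- B's pass over the distinct characters of `small` decides the sub-multiset test.
lemma altTest_spec (small large : List Char) :
    ((countsB small).items.all (fun q => decide (q.2 ≤ (countsB large).getD q.1 0)))
      = decide (∀ c ∈ small, (small.count c : Int) ≤ (countsB large).getD c 0) := by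
  rw [countsB_eq_counter small, PySem.Dict.items_counter, List.all_map]
  show ((PySem.Set.ofList small).all
      fun k => decide ((small.count k : Int) ≤ (countsB large).getD k 0)) = _
  rw [all_decide]
  apply decide_eq_decide.mpr
  constructor
  · intro h c hc
    exact h c ((PySem.Set.mem_ofList _ _).mpr hc)
  · intro h c hc
    exact h c ((PySem.Set.mem_ofList _ _).mp hc)

-- A side = B side on the chosen (smaller, larger) pair.
lemma sides_eq (small large : List Char) :
    checkLoopA small (dictBuilderA large)
      = ((countsB small).items.all (fun q => decide (q.2 ≤ (countsB large).getD q.1 0))) := by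
  rw [dictBuilderA_eq_counter, altTest_spec, checkLoopA_spec]
  · apply decide_eq_decide.mpr
    rw [countsB_eq_counter]
  · intro c
    rw [PySem.Dict.getD_counter]
    exact Int.natCast_nonneg _

-- ===== VERDICT (by name: the statement is the Claim_ definition above) =====
theorem checkPermutation_spec : Claim_equal_checkPermutation := by
  intro str1 str2 _
  unfold Spec_checkPermutation checkPermutation checkPermutation_alt
  split_ifs with h1 h2
  · rfl
  · exact sides_eq _ _
  · exact sides_eq _ _
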